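-- pv_equiv track=rewrite | github.com/zykogithub/projets_du_lyc-e | term/periode_3/exercice_jointure_fini.py | jointure
-- ===== SOURCE A (Python) =====
-- def jointure(emails_ids, ids_pseudos):
--     dico={}
--     for keys,values in emails_ids.items():
--         for cle,valeur in ids_pseudos.items():
--             if values==cle:
--                 dico[keys]=valeur
--         if keys not in dico:
--             dico[keys]=keys
--
--     return dico
-- ===== SOURCE B (Python) =====
-- def jointure(emails_ids, ids_pseudos):
--     dico = {email: email for email in emails_ids}
--     index = {}
--     for email, i in emails_ids.items():
--         index.setdefault(i, []).append(email)
--     for i, pseudo in ids_pseudos.items():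
--         for email in index.get(i, []):
--             dico[email] = pseudo
--     return dico
-- ===== Notes on version B (the rewrite author's own statement) =====
-- stated objective: faster
-- what changed: A scans all of ids_pseudos once per email (nested loops); B pre-fills each email with itself as default, builds an inverse index id -> list of emails in one pass over emails_ids, then makes one pass over ids_pseudos overwriting via the index.
import Mathlib
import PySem

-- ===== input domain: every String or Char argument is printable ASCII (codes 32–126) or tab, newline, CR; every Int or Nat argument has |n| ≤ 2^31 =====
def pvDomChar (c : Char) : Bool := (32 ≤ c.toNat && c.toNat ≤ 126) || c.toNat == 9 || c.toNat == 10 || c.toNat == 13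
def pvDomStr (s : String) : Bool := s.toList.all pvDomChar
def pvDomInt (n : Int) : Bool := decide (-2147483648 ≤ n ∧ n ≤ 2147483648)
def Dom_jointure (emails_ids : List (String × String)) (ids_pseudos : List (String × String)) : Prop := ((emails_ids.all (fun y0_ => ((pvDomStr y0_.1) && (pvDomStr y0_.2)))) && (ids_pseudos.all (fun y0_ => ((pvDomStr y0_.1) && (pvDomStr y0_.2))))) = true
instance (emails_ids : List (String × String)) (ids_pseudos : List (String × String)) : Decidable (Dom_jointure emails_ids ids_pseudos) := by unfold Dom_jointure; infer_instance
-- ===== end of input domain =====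

-- B replaces A's nested scan of ids_pseudos per email by a default-filled dict plus an
-- inverse index id -> emails, one pass over each dict (objective: faster).

-- ===== PORT A =====
def jointure (emails_ids : List (String × String)) (ids_pseudos : List (String × String)) : List (String × String) :=
  (emails_ids.foldl (fun dico p =>
      let dico := ids_pseudos.foldl (fun d q =>
        if p.2 == q.1 then d.insert p.1 q.2 else d) dico
      if dico.contains p.1 then dico else dico.insert p.1 p.1)
    (PySem.Dict.empty : PySem.Dict String String)).items

-- ===== PORT B =====
def jointure_alt (emails_ids : List (String × String)) (ids_pseudos : List (String × String)) : List (String × String) :=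
  let dico := emails_ids.foldl (fun d p => d.insert p.1 p.1)
      (PySem.Dict.empty : PySem.Dict String String)
  let index := emails_ids.foldl (fun d p => d.modify p.2 [] (· ++ [p.1]))
      (PySem.Dict.empty : PySem.Dict String (List String))
  (ids_pseudos.foldl (fun d q =>
      (index.getD q.1 []).foldl (fun d e => d.insert e q.2) d) dico).items

-- ===== PRECONDITION & SPEC =====
-- Pre_ excludes association lists whose email keys repeat: a Python dict cannot contain a
-- duplicate key, so such lists encode no dict input of A.
def Pre_jointure (emails_ids : List (String × String)) (ids_pseudos : List (String × String)) : Prop :=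
  (emails_ids.map Prod.fst).Nodup
instance (emails_ids : List (String × String)) (ids_pseudos : List (String × String)) : Decidable (Pre_jointure emails_ids ids_pseudos) := by unfold Pre_jointure; infer_instance

def pvWitness_jointure : (List (String × String)) × (List (String × String)) :=
  ([("a@x", "1"), ("b@x", "2")], [("1", "alice")])

def Spec_jointure (emails_ids : List (String × String)) (ids_pseudos : List (String × String)) (out : List (String × String)) : Prop := out = jointure_alt emails_ids ids_pseudos
instance (emails_ids : List (String × String)) (ids_pseudos : List (String × String)) (out : List (String × String)) : Decidable (Spec_jointure emails_ids ids_pseudos out) := by unfold Spec_jointure; infer_instance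

-- ===== CLAIM (what is proved, stated in full; the proofs are below) =====
def Claim_equal_jointure : Prop := ∀ (emails_ids : List (String × String)) (ids_pseudos : List (String × String)), Dom_jointure emails_ids ids_pseudos → Pre_jointure emails_ids ids_pseudos → Spec_jointure emails_ids ids_pseudos (jointure emails_ids ids_pseudos)

-- ===== LEMMAS AND PROOFS =====

-- last value stored for id i while scanning ids_pseudos (Option form, as A's inner loop builds it)
def lastVal (ids : List (String × String)) (i : String) : Option String :=
  ids.foldl (fun a q => if i == q.1 then some q.2 else a) none

-- last value stored for id i, with default (as B's overwriting pass computes it)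
def vFold (ids : List (String × String)) (i dflt : String) : String :=
  ids.foldl (fun a q => if i == q.1 then q.2 else a) dflt

lemma getD_lastVal_fold (ids : List (String × String)) (i : String) (a : Option String) (dflt : String) :
    (ids.foldl (fun a q => if i == q.1 then some q.2 else a) a).getD dflt
    = ids.foldl (fun a q => if i == q.1 then q.2 else a) (a.getD dflt) := by
  induction ids generalizing a with
  | nil => rfl
  | cons q rest ih =>
    simp only [List.foldl_cons]
    rw [ih]
    cases h : (i == q.1) <;> simp

lemma getD_lastVal (ids : List (String × String)) (i dflt : String) :
    (lastVal ids i).getD dflt = vFold ids i dflt := by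
  unfold lastVal vFold
  simpa using getD_lastVal_fold ids i none dflt

lemma inner_fold (ids : List (String × String)) (d : PySem.Dict String String) (k i : String)
    (a : Option String) :
    ids.foldl (fun d q => if i == q.1 then d.insert k q.2 else d)
      (match a with | none => d | some w => d.insert k w)
    = match ids.foldl (fun a q => if i == q.1 then some q.2 else a) a with
      | none => d | some w => d.insert k w := by
  induction ids generalizing a with
  | nil => rfl
  | cons q rest ih =>
    simp only [List.foldl_cons]
    by_cases h : (i == q.1) = true
    · simp only [h, if_true]
      have heq : (match a with | none => d | some w => d.insert k w).insert k q.2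
          = (match (some q.2 : Option String) with | none => d | some w => d.insert k w) := by
        cases a with
        | none => rfl
        | some w => exact PySem.Dict.insert_insert_self ..
      rw [heq]
      exact ih (some q.2)
    · simp only [h, Bool.false_eq_true, if_false]
      exact ih a

def stepA (ids : List (String × String)) (dico : PySem.Dict String String) (p : String × String) :
    PySem.Dict String String :=
  let dico := ids.foldl (fun d q => if p.2 == q.1 then d.insert p.1 q.2 else d) dico
  if dico.contains p.1 then dico else dico.insert p.1 p.1

lemma stepA_items (ids : List (String × String)) (d : PySem.Dict String String)
    (p : String × String) (hk : d.contains p.1 = false) :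
    (stepA ids d p).items = d.items ++ [(p.1, (lastVal ids p.2).getD p.1)] := by
  have h : ids.foldl (fun d q => if p.2 == q.1 then d.insert p.1 q.2 else d) d
      = match lastVal ids p.2 with | none => d | some w => d.insert p.1 w :=
    inner_fold ids d p.1 p.2 none
  unfold stepA
  cases hl : lastVal ids p.2 with
  | none =>
    rw [hl] at h
    simp only [h, hk, Bool.false_eq_true, if_false]
    simp [PySem.Dict.items_insert_of_not_contains, hk]
  | some w =>
    rw [hl] at h
    simp only [h, PySem.Dict.contains_insert_self, if_true]
    simp [PySem.Dict.items_insert_of_not_contains, hk]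

lemma A_fold (ids : List (String × String)) (emails : List (String × String))
    (d : PySem.Dict String String)
    (hfresh : ∀ p ∈ emails, d.contains p.1 = false)
    (hnd : (emails.map Prod.fst).Nodup) :
    (emails.foldl (stepA ids) d).items
    = d.items ++ emails.map (fun p => (p.1, (lastVal ids p.2).getD p.1)) := by
  induction emails generalizing d with
  | nil => simp
  | cons p rest ih =>
    have hk : d.contains p.1 = false := hfresh p (by simp)
    have hst := stepA_items ids d p hk
    have hkeys : (stepA ids d p).keys = d.keys ++ [p.1] := by
      simp [PySem.Dict.keys, hst]
    have hnd' : (rest.map Prod.fst).Nodup := by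
      simp only [List.map_cons, List.nodup_cons] at hnd
      exact hnd.2
    have hne : p.1 ∉ rest.map Prod.fst := by
      simp only [List.map_cons, List.nodup_cons] at hnd
      exact hnd.1
    have hfresh' : ∀ q ∈ rest, (stepA ids d p).contains q.1 = false := by
      intro q hq
      cases hc : (stepA ids d p).contains q.1 with
      | false => rfl
      | true =>
        exfalso
        have hm := (PySem.Dict.contains_iff_mem_keys _ _).mp hc
        rw [hkeys] at hm
        rcases List.mem_append.mp hm with hm1 | hm2
        · have : d.contains q.1 = true := (PySem.Dict.contains_iff_mem_keys _ _).mpr hm1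
          rw [hfresh q (List.mem_cons_of_mem _ hq)] at this
          exact Bool.false_ne_true this
        · have hq1 : q.1 = p.1 := by simpa using hm2
          exact hne (hq1 ▸ List.mem_map_of_mem hq)
    simp only [List.foldl_cons, List.map_cons]
    rw [ih (stepA ids d p) hfresh' hnd', hst]
    simp

lemma key_inj {l : List (String × String)} (hnd : (l.map Prod.fst).Nodup)
    {a b : String × String} (ha : a ∈ l) (hb : b ∈ l) (h : a.1 = b.1) : a = b := by
  exact List.inj_on_of_nodup_map hnd ha hb h

lemma foldl_insert_getD (es : List String) (d : PySem.Dict String String) (v k dflt : String) :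
    (es.foldl (fun d e => d.insert e v) d).getD k dflt
    = if k ∈ es then v else d.getD k dflt := by
  induction es generalizing d with
  | nil => simp
  | cons e rest ih =>
    simp only [List.foldl_cons]
    rw [ih, PySem.Dict.getD_insert]
    by_cases h1 : k ∈ rest <;> by_cases h2 : k = e <;> simp [h1, h2]

lemma foldl_insert_keys (es : List String) (d : PySem.Dict String String) (v : String)
    (hsub : ∀ e ∈ es, e ∈ d.keys) :
    (es.foldl (fun d e => d.insert e v) d).keys = d.keys := by
  induction es generalizing d with
  | nil => rfl
  | cons e rest ih =>
    have hc : d.contains e = true :=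
      (PySem.Dict.contains_iff_mem_keys _ _).mpr (hsub e (by simp))
    have hke : (d.insert e v).keys = d.keys := PySem.Dict.keys_insert_of_contains d v hc
    simp only [List.foldl_cons]
    rw [ih (d.insert e v) (fun x hx => by rw [hke]; exact hsub x (List.mem_cons_of_mem _ hx)), hke]


lemma mem_idx_iff {emails : List (String × String)} (hnd : (emails.map Prod.fst).Nodup)
    {p : String × String} (hp : p ∈ emails) (i : String) :
    p.1 ∈ (emails.filter (fun r => r.2 == i)).map Prod.fst ↔ (p.2 == i) = true := by
  constructor
  · intro h
    rcases List.mem_map.mp h with ⟨r, hr, hr1⟩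
    rcases List.mem_filter.mp hr with ⟨hrm, hri⟩
    have : r = p := key_inj hnd hrm hp hr1
    subst this
    exact hri
  · intro h
    exact List.mem_map_of_mem (List.mem_filter.mpr ⟨hp, h⟩)

lemma B_fold_getD (ids : List (String × String)) {emails : List (String × String)}
    (hnd : (emails.map Prod.fst).Nodup) {p : String × String} (hp : p ∈ emails)
    (idxget : String → List String)
    (hidx : ∀ i, idxget i = (emails.filter (fun r => r.2 == i)).map Prod.fst) :
    ∀ (d : PySem.Dict String String) (dflt : String),
    (ids.foldl (fun d q => (idxget q.1).foldl (fun d e => d.insert e q.2) d) d).getD p.1 dflt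
    = ids.foldl (fun a q => if p.2 == q.1 then q.2 else a) (d.getD p.1 dflt) := by
  induction ids with
  | nil => intro d dflt; rfl
  | cons q rest ih =>
    intro d dflt
    simp only [List.foldl_cons]
    rw [ih]
    congr 1
    rw [foldl_insert_getD, hidx]
    by_cases h : (p.2 == q.1) = true
    · rw [if_pos ((mem_idx_iff hnd hp q.1).mpr h), if_pos h]
    · rw [if_neg (fun hm => h ((mem_idx_iff hnd hp q.1).mp hm)), if_neg h]

lemma B_fold_keys (ids : List (String × String)) {emails : List (String × String)}
    (idxget : String → List String)
    (hidx : ∀ i, idxget i = (emails.filter (fun r => r.2 == i)).map Prod.fst) :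
    ∀ (d : PySem.Dict String String), d.keys = emails.map Prod.fst →
    (ids.foldl (fun d q => (idxget q.1).foldl (fun d e => d.insert e q.2) d) d).keys
    = emails.map Prod.fst := by
  induction ids with
  | nil => intro d hd; exact hd
  | cons q rest ih =>
    intro d hd
    simp only [List.foldl_cons]
    apply ih
    rw [foldl_insert_keys, hd]
    intro e he
    rw [hidx] at he
    rcases List.mem_map.mp he with ⟨r, hr, hr1⟩
    rw [hd]
    exact hr1 ▸ List.mem_map_of_mem (List.mem_filter.mp hr).1

-- ===== VERDICT (by name: the statement is the Claim_ definition above) =====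
theorem jointure_spec : Claim_equal_jointure := by
  intro emails ids _ hpre
  unfold Pre_jointure at hpre
  show jointure emails ids = jointure_alt emails ids
  -- A side
  have hA : jointure emails ids
      = emails.map (fun p => (p.1, (lastVal ids p.2).getD p.1)) := by
    show (emails.foldl (stepA ids) PySem.Dict.empty).items = _
    have h := A_fold ids emails PySem.Dict.empty
      (fun p _ => by simp [PySem.Dict.contains_empty]) hpre
    simpa using h
  -- B side
  have hd0items : (emails.foldl (fun d p => d.insert p.1 p.1)
      (PySem.Dict.empty : PySem.Dict String String)).items
      = emails.map (fun p => (p.1, p.1)) := by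
    have h := PySem.Dict.items_foldl_insert_fresh (l := emails) (k := Prod.fst)
      (v := Prod.fst) (d := (PySem.Dict.empty : PySem.Dict String String))
      (fun a _ => PySem.Dict.contains_empty _) hpre
    simpa using h
  have hd0keys : (emails.foldl (fun d p => d.insert p.1 p.1)
      (PySem.Dict.empty : PySem.Dict String String)).keys = emails.map Prod.fst := by
    simp [PySem.Dict.keys, hd0items]
  have hidx : ∀ i, (emails.foldl (fun d p => d.modify p.2 [] (· ++ [p.1]))
      (PySem.Dict.empty : PySem.Dict String (List String))).getD i []
      = (emails.filter (fun r => r.2 == i)).map Prod.fst := by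
    intro i
    have h1 : emails.foldl (fun d p => d.modify p.2 [] (· ++ [p.1]))
        (PySem.Dict.empty : PySem.Dict String (List String))
        = (emails.map (fun p => (p.2, p.1))).foldl
            (fun d p => d.modify p.1 [] (· ++ [p.2])) PySem.Dict.empty := by
      rw [List.foldl_map]
    rw [h1, PySem.Dict.getD_foldl_modify_append]
    simp [List.filter_map, List.map_map, Function.comp_def]
  have hB : jointure_alt emails ids
      = emails.map (fun p => (p.1, (lastVal ids p.2).getD p.1)) := by
    show (ids.foldl (fun d q =>
        ((emails.foldl (fun d p => d.modify p.2 [] (· ++ [p.1]))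
          (PySem.Dict.empty : PySem.Dict String (List String))).getD q.1 []).foldl
          (fun d e => d.insert e q.2) d)
        (emails.foldl (fun d p => d.insert p.1 p.1)
          (PySem.Dict.empty : PySem.Dict String String))).items
      = emails.map (fun p => (p.1, (lastVal ids p.2).getD p.1))
    have hFkeys := B_fold_keys (emails := emails) ids _ hidx
      (emails.foldl (fun d p => d.insert p.1 p.1) PySem.Dict.empty) hd0keys
    have hFnodup : (ids.foldl (fun d q =>
        ((emails.foldl (fun d p => d.modify p.2 [] (· ++ [p.1]))
          (PySem.Dict.empty : PySem.Dict String (List String))).getD q.1 []).foldl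
          (fun d e => d.insert e q.2) d)
        (emails.foldl (fun d p => d.insert p.1 p.1)
          (PySem.Dict.empty : PySem.Dict String String))).keys.Nodup := by
      rw [hFkeys]; exact hpre
    rw [PySem.Dict.items_eq_map_keys _ hFnodup "", hFkeys, List.map_map]
    apply List.map_congr_left
    intro p hp
    have hgd := B_fold_getD (emails := emails) ids hpre hp _ hidx
      (emails.foldl (fun d p => d.insert p.1 p.1) PySem.Dict.empty) ""
    have hd0nodup : (emails.foldl (fun d p => d.insert p.1 p.1)
        (PySem.Dict.empty : PySem.Dict String String)).keys.Nodup := by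
      rw [hd0keys]; exact hpre
    have hd0get : (emails.foldl (fun d p => d.insert p.1 p.1)
        (PySem.Dict.empty : PySem.Dict String String)).getD p.1 "" = p.1 := by
      have hmem : (p.1, p.1) ∈ (emails.foldl (fun d p => d.insert p.1 p.1)
          (PySem.Dict.empty : PySem.Dict String String)).items := by
        rw [hd0items]; exact List.mem_map_of_mem hp
      exact PySem.Dict.getD_of_mem_items _ hmem hd0nodup ""
    simp only [Function.comp_apply]
    rw [hgd, hd0get, getD_lastVal]
    rfl
  rw [hA, hB]
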